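-- pv_equiv track=rewrite | github.com/Dhia-HajAli/ArResumer | resumer.py | sent_pos_para
-- ===== SOURCE A (Python) =====
-- import math
--
-- def sent_pos_para(sentences):
--     sent_pos_para = {}
--     tier1 = math.ceil(len(sentences)*1/3)
--     tier2 = math.ceil(len(sentences)*2/3)
--     for sent in sentences:
--         if ((sentences.index(sent)+1)<=tier1):
--             if ((sentences.index(sent)+1)<=math.ceil(tier1*1/3)):
--                 sent_pos_para[sent] = 1
--             elif ((sentences.index(sent)+1)>math.ceil(tier1*2/3)):
--                 sent_pos_para[sent] = 3
--             else:
--                 sent_pos_para[sent] = 2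
--         elif ((sentences.index(sent)+1)>tier2):
--             if ((sentences.index(sent)+1)<=math.ceil((len(sentences)-tier2)*1/3+tier2)):
--                 sent_pos_para[sent] = 1
--             elif ((sentences.index(sent)+1)>math.ceil((len(sentences)-tier2)*2/3+tier2)):
--                 sent_pos_para[sent] = 3
--             else:
--                 sent_pos_para[sent] = 2
--         else:
--             if ((sentences.index(sent)+1)<=math.ceil((tier2-tier1)*1/3+tier1)):
--                 sent_pos_para[sent] = 1
--             elif ((sentences.index(sent)+1)>math.ceil((tier2-tier1)*2/3+tier1)):
--                 sent_pos_para[sent] = 3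
--             else:
--                 sent_pos_para[sent] = 2
--     return sent_pos_para
-- ===== SOURCE B (Python) =====
-- import math
--
-- def _seg(L):
--     # labels for one contiguous block of L positions: first ceil(L/3) get 1,
--     # up to ceil(2L/3) get 2, the rest get 3
--     a = math.ceil(L / 3)
--     b = math.ceil(2 * L / 3)
--     return [1] * a + [2] * (b - a) + [3] * (L - b)
--
-- def sent_pos_para(sentences):
--     n = len(sentences)
--     t1 = math.ceil(n / 3)
--     t2 = math.ceil(2 * n / 3)
--     labels = _seg(t1) + _seg(t2 - t1) + _seg(n - t2)
--     out = {}
--     for i, s in enumerate(sentences):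
--         if s not in out:
--             out[s] = labels[i]
--     return out
-- ===== Notes on version B (the rewrite author's own statement) =====
-- stated objective: faster
-- what changed: B precomputes the whole position->tier label table once by concatenating three replicated segments (boundaries computed once per tier) and builds the dict in a single enumerate pass with a first-occurrence guard, instead of A's per-element branch ladder that calls sentences.index(sent) (a linear scan) up to seven times per element.
import Mathlib
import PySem

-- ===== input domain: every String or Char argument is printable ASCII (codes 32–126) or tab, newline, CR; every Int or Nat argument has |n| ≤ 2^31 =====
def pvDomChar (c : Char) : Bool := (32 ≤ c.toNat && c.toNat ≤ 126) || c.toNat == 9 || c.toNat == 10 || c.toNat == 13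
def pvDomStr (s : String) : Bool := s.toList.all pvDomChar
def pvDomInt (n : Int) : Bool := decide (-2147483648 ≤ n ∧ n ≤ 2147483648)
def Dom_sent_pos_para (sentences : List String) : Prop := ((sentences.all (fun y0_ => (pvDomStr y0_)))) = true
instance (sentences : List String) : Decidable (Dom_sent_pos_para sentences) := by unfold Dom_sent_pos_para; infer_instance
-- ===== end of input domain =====

-- B replaces A's per-sentence branch ladder (with repeated linear .index scans) by a
-- precomputed position->label table plus one enumerate pass: O(n) instead of O(n^2).

-- math.ceil(x/3) for integer x (exact: the float division is correctly rounded and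
-- cannot cross an integer for any list length, so the ceiling equals ⌈x/3⌉)
def pvCeil3 (a : Int) : Int := -(PySem.Int.floordiv (-a) 3)

-- ===== PORT A =====
-- A's `sentences.index(sent)` always succeeds (sent ∈ sentences), hence `.getD 0`;
-- A re-evaluates the same call in every comparison, we bind the common value once.
-- `math.ceil(u*1/3 + t)` / `math.ceil(u*2/3 + t)` with integer t are ported as
-- pvCeil3 (u + 3*t) / pvCeil3 (2*u + 3*t), their exact values.
def sent_pos_para (sentences : List String) : List (String × Int) :=
  let n : Int := PySem.List.len sentences
  let tier1 := pvCeil3 n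
  let tier2 := pvCeil3 (2 * n)
  (sentences.foldl (fun d sent =>
      let pos : Int := ((PySem.List.index? sentences sent).getD 0 : Nat) + 1
      if pos ≤ tier1 then
        if pos ≤ pvCeil3 tier1 then d.insert sent 1
        else if pos > pvCeil3 (2 * tier1) then d.insert sent 3
        else d.insert sent 2
      else if pos > tier2 then
        if pos ≤ pvCeil3 ((n - tier2) + 3 * tier2) then d.insert sent 1
        else if pos > pvCeil3 (2 * (n - tier2) + 3 * tier2) then d.insert sent 3
        else d.insert sent 2
      else
        if pos ≤ pvCeil3 ((tier2 - tier1) + 3 * tier1) then d.insert sent 1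
        else if pos > pvCeil3 (2 * (tier2 - tier1) + 3 * tier1) then d.insert sent 3
        else d.insert sent 2)
    PySem.Dict.empty).items

-- ===== PORT B =====
-- port of _seg: [1]*a + [2]*(b-a) + [3]*(L-b)
def pvSeg (L : Int) : List Int :=
  let a := pvCeil3 L
  let b := pvCeil3 (2 * L)
  List.replicate a.toNat 1 ++ List.replicate (b - a).toNat 2 ++ List.replicate (L - b).toNat 3

def sent_pos_para_alt (sentences : List String) : List (String × Int) :=
  let n : Int := PySem.List.len sentences
  let t1 := pvCeil3 n
  let t2 := pvCeil3 (2 * n)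
  let labels := pvSeg t1 ++ pvSeg (t2 - t1) ++ pvSeg (n - t2)
  ((PySem.List.enumerate sentences).foldl (fun d (p : Int × String) =>
      if d.contains p.2 then d else d.insert p.2 (PySem.List.pyGetD labels p.1 0))
    PySem.Dict.empty).items

-- ===== PRECONDITION & SPEC =====
def Spec_sent_pos_para (sentences : List String) (out : List (String × Int)) : Prop := out = sent_pos_para_alt sentences
instance (sentences : List String) (out : List (String × Int)) : Decidable (Spec_sent_pos_para sentences out) := by unfold Spec_sent_pos_para; infer_instance

-- ===== CLAIM (what is proved, stated in full; the proofs are below) =====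
def Claim_equal_sent_pos_para : Prop := ∀ (sentences : List String), Dom_sent_pos_para sentences → Spec_sent_pos_para sentences (sent_pos_para sentences)

-- ===== LEMMAS AND PROOFS =====

-- A's branch ladder as a value, for a sentence at 1-based position pos in a list of length n
def pvLadder (n pos : Int) : Int :=
  let tier1 := pvCeil3 n
  let tier2 := pvCeil3 (2 * n)
  if pos ≤ tier1 then
    if pos ≤ pvCeil3 tier1 then 1
    else if pos > pvCeil3 (2 * tier1) then 3
    else 2
  else if pos > tier2 then
    if pos ≤ pvCeil3 ((n - tier2) + 3 * tier2) then 1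
    else if pos > pvCeil3 (2 * (n - tier2) + 3 * tier2) then 3
    else 2
  else
    if pos ≤ pvCeil3 ((tier2 - tier1) + 3 * tier1) then 1
    else if pos > pvCeil3 (2 * (tier2 - tier1) + 3 * tier1) then 3
    else 2

lemma pvCeil3_bracket (a : Int) : (pvCeil3 a - 1) * 3 < a ∧ a ≤ pvCeil3 a * 3 :=
  (PySem.Int.neg_floordiv_neg_eq_iff_of_pos (by norm_num)).mp rfl

lemma pvCeil3_shift (x t : Int) : pvCeil3 (x + 3 * t) = pvCeil3 x + t := by
  have h1 := pvCeil3_bracket (x + 3 * t)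
  have h2 := pvCeil3_bracket x
  omega

lemma pvSeg_length (L : Int) (hL : 0 ≤ L) : (pvSeg L).length = L.toNat := by
  have h1 := pvCeil3_bracket L
  have h2 := pvCeil3_bracket (2 * L)
  simp [pvSeg]
  omega

lemma pvSeg_getD (L : Int) (j : Nat) (hj : (j : Int) < L) :
    (pvSeg L).getD j 0 =
      if (j : Int) + 1 ≤ pvCeil3 L then 1
      else if (j : Int) + 1 > pvCeil3 (2 * L) then 3 else 2 := by
  have h1 := pvCeil3_bracket L
  have h2 := pvCeil3_bracket (2 * L)
  unfold pvSeg
  simp only [List.getD, List.getElem?_append, List.length_replicate, List.length_append]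
  split_ifs <;> simp only [List.getElem?_replicate] <;> split_ifs <;> simp <;> omega

-- the labels table of B, for a list of length n
def pvLabels (n : Int) : List Int :=
  pvSeg (pvCeil3 n) ++ pvSeg (pvCeil3 (2 * n) - pvCeil3 n) ++ pvSeg (n - pvCeil3 (2 * n))

lemma pvLabels_getD (n : Int) (j : Nat) (hj : (j : Int) < n) :
    (pvLabels n).getD j 0 = pvLadder n ((j : Int) + 1) := by
  have hb1 := pvCeil3_bracket n
  have hb2 := pvCeil3_bracket (2 * n)
  set t1 := pvCeil3 n with ht1
  set t2 := pvCeil3 (2 * n) with ht2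
  have h01 : 0 ≤ t1 := by omega
  have h12 : t1 ≤ t2 := by omega
  have h2n : t2 ≤ n := by omega
  unfold pvLabels pvLadder
  rw [← ht1, ← ht2]
  simp only [List.getD, List.getElem?_append, List.length_append,
    pvSeg_length t1 h01, pvSeg_length (t2 - t1) (by omega)]
  by_cases hA : j < t1.toNat
  · rw [if_pos (show j < t1.toNat + (t2 - t1).toNat by omega), if_pos hA]
    have := pvSeg_getD t1 j (by omega)
    simp only [List.getD] at this
    rw [this]
    have hcond : (j : Int) + 1 ≤ t1 := by omega
    simp only [if_pos hcond]
  · by_cases hB : j < t1.toNat + (t2 - t1).toNat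
    · rw [if_pos hB, if_neg hA]
      have := pvSeg_getD (t2 - t1) (j - t1.toNat) (by omega)
      simp only [List.getD] at this
      rw [this]
      have hA' : ¬ ((j : Int) + 1 ≤ t1) := by omega
      have hB' : ¬ ((j : Int) + 1 > t2) := by omega
      rw [if_neg hA', if_neg hB']
      rw [pvCeil3_shift (t2 - t1) t1, pvCeil3_shift (2 * (t2 - t1)) t1]
      have hcast : ((j - t1.toNat : Nat) : Int) = (j : Int) - t1 := by omega
      rw [hcast]
      split_ifs <;> omega
    · rw [if_neg hB]
      have := pvSeg_getD (n - t2) (j - (t1.toNat + (t2 - t1).toNat)) (by omega)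
      simp only [List.getD] at this
      rw [this]
      have hA' : ¬ ((j : Int) + 1 ≤ t1) := by omega
      have hB' : (j : Int) + 1 > t2 := by omega
      rw [if_neg hA', if_pos hB']
      rw [pvCeil3_shift (n - t2) t2, pvCeil3_shift (2 * (n - t2)) t2]
      have hcast : ((j - (t1.toNat + (t2 - t1).toNat) : Nat) : Int) = (j : Int) - t2 := by omega
      rw [hcast]
      split_ifs <;> omega

-- inserting a key with its current value changes nothing
lemma insert_self_noop {κ ν : Type} [BEq κ] [LawfulBEq κ] (d : PySem.Dict κ ν) (k : κ) (v : ν)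
    (hnd : d.keys.Nodup) (h : d.get? k = some v) : d.insert k v = d := by
  apply PySem.Dict.ext
  have hc : d.contains k = true := by
    rw [PySem.Dict.contains_eq_isSome_get?, h]; rfl
  rw [PySem.Dict.items_insert_of_contains d v hc]
  conv_rhs => rw [← List.map_id d.items]
  apply List.map_congr_left
  intro p hp
  by_cases hk : p.1 == k
  · have hk' : p.1 = k := by exact eq_of_beq hk
    have := PySem.Dict.get?_of_mem_items d (by simpa using hp) hnd
    rw [hk', h] at this
    simp only [hk, if_pos]
    have : p.2 = v := by injection this.symm
    rw [← hk', ← this]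
    simp
  · simp [hk]

-- A's fold step produces exactly an insert of the ladder value
lemma stepA_eq (full : List String) (d : PySem.Dict String Int) (s : String) :
    (let n : Int := PySem.List.len full
     let tier1 := pvCeil3 n
     let tier2 := pvCeil3 (2 * n)
     let pos : Int := ((PySem.List.index? full s).getD 0 : Nat) + 1
     if pos ≤ tier1 then
       if pos ≤ pvCeil3 tier1 then d.insert s 1
       else if pos > pvCeil3 (2 * tier1) then d.insert s 3
       else d.insert s 2
     else if pos > tier2 then
       if pos ≤ pvCeil3 ((n - tier2) + 3 * tier2) then d.insert s 1
       else if pos > pvCeil3 (2 * (n - tier2) + 3 * tier2) then d.insert s 3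
       else d.insert s 2
     else
       if pos ≤ pvCeil3 ((tier2 - tier1) + 3 * tier1) then d.insert s 1
       else if pos > pvCeil3 (2 * (tier2 - tier1) + 3 * tier1) then d.insert s 3
       else d.insert s 2) =
    d.insert s (pvLadder (PySem.List.len full) (((PySem.List.index? full s).getD 0 : Nat) + 1)) := by
  simp only [pvLadder]
  split_ifs <;> rfl

-- the main two-fold agreement, by induction on the unprocessed suffix
lemma fold_agree (full : List String) (l pre : List String) (hfull : full = pre ++ l)
    (d : PySem.Dict String Int)
    (hnd : d.keys.Nodup)
    (hk : ∀ s, d.contains s = decide (s ∈ pre))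
    (hv : ∀ s, s ∈ pre →
      d.get? s = some (pvLadder (PySem.List.len full) (((PySem.List.index? full s).getD 0 : Nat) + 1))) :
    l.foldl (fun d sent =>
      let n : Int := PySem.List.len full
      let tier1 := pvCeil3 n
      let tier2 := pvCeil3 (2 * n)
      let pos : Int := ((PySem.List.index? full sent).getD 0 : Nat) + 1
      if pos ≤ tier1 then
        if pos ≤ pvCeil3 tier1 then d.insert sent 1
        else if pos > pvCeil3 (2 * tier1) then d.insert sent 3
        else d.insert sent 2
      else if pos > tier2 then
        if pos ≤ pvCeil3 ((n - tier2) + 3 * tier2) then d.insert sent 1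
        else if pos > pvCeil3 (2 * (n - tier2) + 3 * tier2) then d.insert sent 3
        else d.insert sent 2
      else
        if pos ≤ pvCeil3 ((tier2 - tier1) + 3 * tier1) then d.insert sent 1
        else if pos > pvCeil3 (2 * (tier2 - tier1) + 3 * tier1) then d.insert sent 3
        else d.insert sent 2) d =
    (PySem.List.enumerate l (pre.length : Int)).foldl (fun d (p : Int × String) =>
      if d.contains p.2 then d else d.insert p.2 (PySem.List.pyGetD (pvLabels (PySem.List.len full)) p.1 0)) d := by
  induction l generalizing pre d with
  | nil => simp [PySem.List.enumerate]
  | cons x l' ih =>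
    rw [PySem.List.enumerate_cons]
    simp only [List.foldl_cons]
    rw [stepA_eq full d x]
    have hlen : full.length = pre.length + (l'.length + 1) := by
      rw [hfull]; simp only [List.length_append, List.length_cons]
    by_cases hx : x ∈ pre
    · -- duplicate: A re-inserts the same value, B skips
      have hidx : PySem.List.index? full x = PySem.List.index? pre x := by
        rw [hfull]; exact PySem.List.index?_append_of_mem _ hx
      have hcx : d.contains x = true := by rw [hk x]; simp [hx]
      rw [insert_self_noop d x _ hnd (hv x hx), if_pos hcx]
      have hpre' : ((pre ++ [x]).length : Int) = (pre.length : Int) + 1 := by simp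
      rw [← hpre']
      exact ih (pre ++ [x]) (by rw [hfull]; simp) d hnd
        (by intro s; rw [hk s]; simp only [List.mem_append, List.mem_singleton]
            by_cases hs : s ∈ pre
            · simp [hs]
            · have : ¬ (s = x) := fun he => hs (he ▸ hx)
              simp [hs, this])
        (by intro s hs
            rcases List.mem_append.mp hs with h | h
            · exact hv s h
            · rw [List.mem_singleton.mp h]; exact hv x hx)
    · -- first occurrence: both insert the same value
      have hidx : PySem.List.index? full x = some pre.length := by
        rw [hfull, PySem.List.index?_eq_some_iff]
        exact ⟨pre, l', rfl, rfl, hx⟩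
      have hcx : d.contains x = false := by rw [hk x]; simp [hx]
      rw [if_neg (by simp [hcx])]
      have hvalB : PySem.List.pyGetD (pvLabels (PySem.List.len full)) (pre.length : Int) 0 =
          pvLadder (PySem.List.len full) (((PySem.List.index? full x).getD 0 : Nat) + 1) := by
        rw [hidx]
        simp only [Option.getD_some, PySem.List.pyGetD_natCast]
        rw [PySem.List.len_eq]
        exact pvLabels_getD _ pre.length (by omega)
      rw [hvalB]
      set v := pvLadder (PySem.List.len full) (((PySem.List.index? full x).getD 0 : Nat) + 1) with hvdef
      have hpre' : ((pre ++ [x]).length : Int) = (pre.length : Int) + 1 := by simp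
      rw [← hpre']
      refine ih (pre ++ [x]) (by rw [hfull]; simp) (d.insert x v) ?_ ?_ ?_
      · exact PySem.Dict.nodup_keys_insert _ _ _ hnd
      · intro s
        rw [PySem.Dict.contains_insert, hk s]
        simp only [List.mem_append, List.mem_singleton]
        by_cases hs : s = x
        · simp [hs]
        · have : (s == x) = false := by simp [hs]
          simp [this, hs]
      · intro s hs
        by_cases hsx : s = x
        · subst hsx
          rw [PySem.Dict.get?_insert_self]
        · rw [PySem.Dict.get?_insert_of_ne _ _ hsx]
          rcases List.mem_append.mp hs with h | h
          · exact hv s h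
          · exact absurd (List.mem_singleton.mp h) hsx

-- ===== VERDICT (by name: the statement is the Claim_ definition above) =====
theorem sent_pos_para_spec : Claim_equal_sent_pos_para := by
  intro sentences _
  unfold Spec_sent_pos_para sent_pos_para sent_pos_para_alt
  exact congrArg PySem.Dict.items (fold_agree sentences sentences [] rfl PySem.Dict.empty
    (by simp [PySem.Dict.keys_empty])
    (by intro s; simp [PySem.Dict.contains_empty])
    (by intro s hs; simp at hs))
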